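-- pv_equiv track=rewrite | github.com/openedx-unsupported/configuration | playbooks/lifecycle_inventory.py | get_e_d_from_tags
-- ===== SOURCE A (Python) =====
-- def get_e_d_from_tags(group):
--
--     environment = "default_environment"
--     deployment = "default_deployment"
--
--     for r in group['Tags']:
--         if r['Key'] == "environment":
--             environment = r['Value']
--         elif r['Key'] == "deployment":
--             deployment = r['Value']
--     return environment,deployment
-- ===== SOURCE B (Python) =====
-- def get_e_d_from_tags(group):
--     def last_value(key, default):
--         # last-wins = first match scanning from the end, with early exit
--         for r in reversed(group['Tags']):
--             if r['Key'] == key: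
--                 return r['Value']
--         return default
--     return (last_value('environment', 'default_environment'),
--             last_value('deployment', 'default_deployment'))
-- ===== Notes on version B (the rewrite author's own statement) =====
-- stated objective: alternative
-- what changed: Replaces A's single forward fold with two branching overwrite accumulators by two staged backward scans that each return the FIRST match from the end (early exit), exploiting that last-write-wins equals first-match-in-reverse.
import Mathlib
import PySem

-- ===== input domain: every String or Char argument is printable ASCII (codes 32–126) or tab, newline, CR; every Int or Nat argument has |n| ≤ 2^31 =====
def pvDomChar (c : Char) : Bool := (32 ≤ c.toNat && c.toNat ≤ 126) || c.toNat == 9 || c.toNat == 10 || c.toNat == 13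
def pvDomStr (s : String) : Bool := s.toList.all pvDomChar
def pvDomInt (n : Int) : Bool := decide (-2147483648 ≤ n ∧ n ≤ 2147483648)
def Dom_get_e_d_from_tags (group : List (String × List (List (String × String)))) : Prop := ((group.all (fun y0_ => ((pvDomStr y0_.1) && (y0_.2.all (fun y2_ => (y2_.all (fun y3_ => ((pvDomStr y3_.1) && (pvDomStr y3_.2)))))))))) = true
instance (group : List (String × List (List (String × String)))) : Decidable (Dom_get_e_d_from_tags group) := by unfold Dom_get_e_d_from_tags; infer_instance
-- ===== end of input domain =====

-- B scans the tag list backwards and returns the first match per key (two staged passes) instead of A's forward overwrite fold.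

-- ===== PORT A =====
-- r['Key'] / r['Value']: first-match association-list lookup; inside Pre_ every lookup the Python
-- performs succeeds, so the "" default of getD is never the value used.
def get_e_d_from_tags (group : List (String × List (List (String × String)))) : String × String :=
  (((List.lookup "Tags" group).getD []).foldl
    (fun (ed : String × String) r =>
      if (List.lookup "Key" r).getD "" = "environment" then ((List.lookup "Value" r).getD "", ed.2)
      else if (List.lookup "Key" r).getD "" = "deployment" then (ed.1, (List.lookup "Value" r).getD "")
      else ed)
    ("default_environment", "default_deployment"))

-- ===== PORT B =====
-- Source B's backward scan with early exit = find? over the reversed list.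
def pvLastValue (ts : List (List (String × String))) (key dflt : String) : String :=
  match ts.reverse.find? (fun r => (List.lookup "Key" r).getD "" == key) with
  | some r => (List.lookup "Value" r).getD ""
  | none => dflt

def get_e_d_from_tags_alt (group : List (String × List (List (String × String)))) : String × String :=
  let ts := (List.lookup "Tags" group).getD []
  (pvLastValue ts "environment" "default_environment",
   pvLastValue ts "deployment" "default_deployment")

-- ===== PRECONDITION & SPEC =====
-- Pre_ = exactly the inputs on which the Python A returns (no KeyError): 'Tags' present, every tag has
-- 'Key', and every tag whose Key is environment/deployment has 'Value'.
def Pre_get_e_d_from_tags (group : List (String × List (List (String × String)))) : Prop :=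
  (List.lookup "Tags" group).isSome = true ∧
  ∀ r ∈ (List.lookup "Tags" group).getD [],
    (List.lookup "Key" r).isSome = true ∧
    (((List.lookup "Key" r).getD "" = "environment" ∨ (List.lookup "Key" r).getD "" = "deployment") →
      (List.lookup "Value" r).isSome = true)
instance (group : List (String × List (List (String × String)))) : Decidable (Pre_get_e_d_from_tags group) := by
  unfold Pre_get_e_d_from_tags; infer_instance

def pvWitness_get_e_d_from_tags : (List (String × List (List (String × String)))) :=
  [("Tags", [[("Key", "environment"), ("Value", "stage")], [("Key", "deployment"), ("Value", "edx")]])]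

def Spec_get_e_d_from_tags (group : List (String × List (List (String × String)))) (out : String × String) : Prop := out = get_e_d_from_tags_alt group
instance (group : List (String × List (List (String × String)))) (out : String × String) : Decidable (Spec_get_e_d_from_tags group out) := by unfold Spec_get_e_d_from_tags; infer_instance

-- ===== CLAIM (what is proved, stated in full; the proofs are below) =====
def Claim_equal_get_e_d_from_tags : Prop := ∀ (group : List (String × List (List (String × String)))), Dom_get_e_d_from_tags group → Pre_get_e_d_from_tags group → Spec_get_e_d_from_tags group (get_e_d_from_tags group)

-- ===== LEMMAS AND PROOFS =====

-- Prepending a tag to the list shifts it to the END of the reversed scan: it only supplies the new default.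
lemma pvLastValue_cons (r : List (String × String)) (ts : List (List (String × String))) (key dflt : String) :
    pvLastValue (r :: ts) key dflt =
      pvLastValue ts key
        (if (List.lookup "Key" r).getD "" = key then (List.lookup "Value" r).getD "" else dflt) := by
  unfold pvLastValue
  rw [List.reverse_cons, List.find?_append]
  cases h : ts.reverse.find? (fun r => (List.lookup "Key" r).getD "" == key) with
  | some v => simp
  | none =>
    by_cases hk : (List.lookup "Key" r).getD "" = key
    · simp [List.find?, hk]
    · have hb : ((List.lookup "Key" r).getD "" == key) = false := by simp [hk]
      simp [List.find?, hb, hk]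

-- Loop correspondence: A's forward fold from accumulator ed equals B's backward first-match with
-- ed's components as the defaults.
lemma fold_eq_lastValue (ts : List (List (String × String))) (ed : String × String) :
    (ts.foldl
      (fun (ed : String × String) r =>
        if (List.lookup "Key" r).getD "" = "environment" then ((List.lookup "Value" r).getD "", ed.2)
        else if (List.lookup "Key" r).getD "" = "deployment" then (ed.1, (List.lookup "Value" r).getD "")
        else ed) ed) =
    (pvLastValue ts "environment" ed.1, pvLastValue ts "deployment" ed.2) := by
  induction ts generalizing ed with
  | nil => simp [pvLastValue]
  | cons r ts ih =>
    rw [List.foldl_cons, ih, pvLastValue_cons, pvLastValue_cons]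
    by_cases hk : (List.lookup "Key" r).getD "" = "environment"
    · have hd : ¬ (List.lookup "Key" r).getD "" = "deployment" := by rw [hk]; decide
      simp [hk]
    · by_cases hd : (List.lookup "Key" r).getD "" = "deployment"
      · simp [hd]
      · simp [hk, hd]

-- ===== VERDICT (by name: the statement is the Claim_ definition above) =====
theorem get_e_d_from_tags_spec : Claim_equal_get_e_d_from_tags := by
  intro group _ _
  unfold Spec_get_e_d_from_tags get_e_d_from_tags get_e_d_from_tags_alt
  exact fold_eq_lastValue _ _
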